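-- pv_equiv track=rewrite | github.com/lanethefox/saas-analytics-training | scripts/chunked_generation.py | calculate_optimal_chunk_size
-- ===== SOURCE A (Python) =====
-- def calculate_optimal_chunk_size(total_records: int,
--                                record_size_bytes: int,
--                                max_memory_mb: int = 100) -> int:
--     """
--     Calculate optimal chunk size based on memory constraints
--
--     Args:
--         total_records: Total number of records to generate
--         record_size_bytes: Average size of one record
--         max_memory_mb: Maximum memory to use in MB
--
--     Returns:
--         Recommended chunk size
--     """
--     max_memory_bytes = max_memory_mb * 1024 * 1024
--     max_chunk_size = max_memory_bytes // record_size_bytes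
--
--     # Common chunk sizes for good performance
--     standard_sizes = [1000, 5000, 10000, 25000, 50000, 100000, 250000, 500000]
--
--     # Find the largest standard size that fits in memory
--     for size in reversed(standard_sizes):
--         if size <= max_chunk_size:
--             return size
--
--     # If even smallest standard size is too big, use calculated size
--     return min(max_chunk_size, total_records)
-- ===== SOURCE B (Python) =====
-- def calculate_optimal_chunk_size(total_records: int,
--                                record_size_bytes: int,
--                                max_memory_mb: int = 100) -> int:
--     max_memory_bytes = max_memory_mb * 1024 * 1024
--     max_chunk_size = max_memory_bytes // record_size_bytes
--
--     standard_sizes = [1000, 5000, 10000, 25000, 50000, 100000, 250000, 500000]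
--
--     # Binary search (bisect_right) for the cutoff index in the sorted list.
--     lo, hi = 0, len(standard_sizes)
--     while lo < hi:
--         mid = (lo + hi) // 2
--         if max_chunk_size < standard_sizes[mid]:
--             hi = mid
--         else:
--             lo = mid + 1
--     if lo > 0:
--         return standard_sizes[lo - 1]
--     return min(max_chunk_size, total_records)
-- ===== Notes on version B (the rewrite author's own statement) =====
-- stated objective: idiomatic
-- what changed: Replaces the linear reverse scan over the standard sizes with a bisect_right-style binary search on the ascending list, indexing the largest fitting size directly.
import Mathlib
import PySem

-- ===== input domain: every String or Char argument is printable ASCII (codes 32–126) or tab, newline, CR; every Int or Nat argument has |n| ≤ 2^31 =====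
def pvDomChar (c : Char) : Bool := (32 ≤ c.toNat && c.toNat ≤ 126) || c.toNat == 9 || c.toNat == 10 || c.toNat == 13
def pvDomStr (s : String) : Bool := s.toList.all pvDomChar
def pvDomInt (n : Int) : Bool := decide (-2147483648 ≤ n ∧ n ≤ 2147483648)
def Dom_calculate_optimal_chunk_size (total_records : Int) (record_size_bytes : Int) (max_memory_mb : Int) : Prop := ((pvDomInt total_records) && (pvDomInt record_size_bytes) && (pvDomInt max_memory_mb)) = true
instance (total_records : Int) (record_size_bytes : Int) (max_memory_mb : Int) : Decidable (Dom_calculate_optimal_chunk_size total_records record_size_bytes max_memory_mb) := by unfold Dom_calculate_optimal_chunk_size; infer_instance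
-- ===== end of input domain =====

-- B replaces A's linear reverse scan of the sorted standard sizes with a bisect_right-style binary search (idiomatic; same results).

-- ===== PORT A =====
-- the 'for size in reversed(standard_sizes): if size <= max_chunk: return size' loop
def pvScanRev (mc : Int) : List Int → Option Int
  | [] => none
  | s :: rest => if s ≤ mc then some s else pvScanRev mc rest

def calculate_optimal_chunk_size (total_records : Int) (record_size_bytes : Int) (max_memory_mb : Int) : Int :=
  let max_memory_bytes := max_memory_mb * 1024 * 1024
  let max_chunk_size := PySem.Int.floordiv max_memory_bytes record_size_bytes
  let standard_sizes : List Int := [1000, 5000, 10000, 25000, 50000, 100000, 250000, 500000]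
  match pvScanRev max_chunk_size standard_sizes.reverse with
  | some s => s
  | none => min max_chunk_size total_records

-- ===== PORT B =====
-- the 'while lo < hi' bisect_right loop (terminates: hi - lo shrinks)
def pvBisect (a : List Int) (x : Int) (lo hi : Nat) : Nat :=
  if lo < hi then
    let mid := (lo + hi) / 2
    if x < a.getD mid 0 then pvBisect a x lo mid
    else pvBisect a x (mid + 1) hi
  else lo
termination_by hi - lo
decreasing_by all_goals omega

def calculate_optimal_chunk_size_alt (total_records : Int) (record_size_bytes : Int) (max_memory_mb : Int) : Int :=
  let max_memory_bytes := max_memory_mb * 1024 * 1024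
  let max_chunk_size := PySem.Int.floordiv max_memory_bytes record_size_bytes
  let standard_sizes : List Int := [1000, 5000, 10000, 25000, 50000, 100000, 250000, 500000]
  let lo := pvBisect standard_sizes max_chunk_size 0 standard_sizes.length
  if lo > 0 then standard_sizes.getD (lo - 1) 0
  else min max_chunk_size total_records

-- ===== PRECONDITION & SPEC =====
-- Pre_ excludes record_size_bytes = 0, where the Python A raises ZeroDivisionError.
def Pre_calculate_optimal_chunk_size (total_records : Int) (record_size_bytes : Int) (max_memory_mb : Int) : Prop := record_size_bytes ≠ 0
instance (total_records : Int) (record_size_bytes : Int) (max_memory_mb : Int) : Decidable (Pre_calculate_optimal_chunk_size total_records record_size_bytes max_memory_mb) := by unfold Pre_calculate_optimal_chunk_size; infer_instance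
def pvWitness_calculate_optimal_chunk_size : Int × Int × Int := (1000000, 200, 100)

def Spec_calculate_optimal_chunk_size (total_records : Int) (record_size_bytes : Int) (max_memory_mb : Int) (out : Int) : Prop := out = calculate_optimal_chunk_size_alt total_records record_size_bytes max_memory_mb
instance (total_records : Int) (record_size_bytes : Int) (max_memory_mb : Int) (out : Int) : Decidable (Spec_calculate_optimal_chunk_size total_records record_size_bytes max_memory_mb out) := by unfold Spec_calculate_optimal_chunk_size; infer_instance

-- ===== CLAIM (what is proved, stated in full; the proofs are below) =====
def Claim_equal_calculate_optimal_chunk_size : Prop := ∀ (total_records : Int) (record_size_bytes : Int) (max_memory_mb : Int), Dom_calculate_optimal_chunk_size total_records record_size_bytes max_memory_mb → Pre_calculate_optimal_chunk_size total_records record_size_bytes max_memory_mb → Spec_calculate_optimal_chunk_size total_records record_size_bytes max_memory_mb (calculate_optimal_chunk_size total_records record_size_bytes max_memory_mb)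

-- ===== LEMMAS AND PROOFS =====
lemma pvBisect_self (a : List Int) (x : Int) (lo : Nat) : pvBisect a x lo lo = lo := by
  rw [pvBisect]; simp
lemma pvBisect_eval (mc : Int) :
    pvBisect [1000, 5000, 10000, 25000, 50000, 100000, 250000, 500000] mc 0 8 =
      (if 500000 ≤ mc then 8 else if 250000 ≤ mc then 7 else if 100000 ≤ mc then 6
       else if 50000 ≤ mc then 5 else if 25000 ≤ mc then 4 else if 10000 ≤ mc then 3
       else if 5000 ≤ mc then 2 else if 1000 ≤ mc then 1 else 0) := by
  rw [pvBisect]; norm_num [List.getD, pvBisect_self]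
  split_ifs <;> (try (rw [pvBisect]; norm_num [List.getD, pvBisect_self])) <;>
    (try split_ifs) <;> (try (rw [pvBisect]; norm_num [List.getD, pvBisect_self])) <;>
    (try split_ifs) <;> (try (rw [pvBisect]; norm_num [List.getD, pvBisect_self])) <;>
    omega
def pvRes (mc tr : Int) : Int :=
  if 500000 ≤ mc then 500000 else if 250000 ≤ mc then 250000 else if 100000 ≤ mc then 100000
  else if 50000 ≤ mc then 50000 else if 25000 ≤ mc then 25000 else if 10000 ≤ mc then 10000
  else if 5000 ≤ mc then 5000 else if 1000 ≤ mc then 1000 else min mc tr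

lemma A_eval (mc tr : Int) :
    (match pvScanRev mc [500000, 250000, 100000, 50000, 25000, 10000, 5000, 1000] with
      | some s => s
      | none => min mc tr) = pvRes mc tr := by
  have h : ∀ o : Option Int, (match o with | some s => s | none => min mc tr) = o.getD (min mc tr) := by
    intro o; cases o <;> rfl
  rw [h]
  simp only [pvScanRev, pvRes]
  by_cases c : (500000:Int) ≤ mc; · rw [if_pos c, if_pos c]; rfl
  rw [if_neg c, if_neg c]
  by_cases c : (250000:Int) ≤ mc; · rw [if_pos c, if_pos c]; rfl
  rw [if_neg c, if_neg c]
  by_cases c : (100000:Int) ≤ mc; · rw [if_pos c, if_pos c]; rfl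
  rw [if_neg c, if_neg c]
  by_cases c : (50000:Int) ≤ mc; · rw [if_pos c, if_pos c]; rfl
  rw [if_neg c, if_neg c]
  by_cases c : (25000:Int) ≤ mc; · rw [if_pos c, if_pos c]; rfl
  rw [if_neg c, if_neg c]
  by_cases c : (10000:Int) ≤ mc; · rw [if_pos c, if_pos c]; rfl
  rw [if_neg c, if_neg c]
  by_cases c : (5000:Int) ≤ mc; · rw [if_pos c, if_pos c]; rfl
  rw [if_neg c, if_neg c]
  by_cases c : (1000:Int) ≤ mc; · rw [if_pos c, if_pos c]; rfl
  rw [if_neg c, if_neg c]; rfl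

lemma B_eval (mc tr : Int) :
    (if pvBisect [1000, 5000, 10000, 25000, 50000, 100000, 250000, 500000] mc 0 8 > 0
     then ([1000, 5000, 10000, 25000, 50000, 100000, 250000, 500000] : List Int).getD
            (pvBisect [1000, 5000, 10000, 25000, 50000, 100000, 250000, 500000] mc 0 8 - 1) 0
     else min mc tr) = pvRes mc tr := by
  rw [pvBisect_eval]
  simp only [pvRes]
  by_cases c : (500000:Int) ≤ mc; · rw [if_pos c, if_pos c]; norm_num [List.getD]
  rw [if_neg c, if_neg c]
  by_cases c : (250000:Int) ≤ mc; · rw [if_pos c, if_pos c]; norm_num [List.getD]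
  rw [if_neg c, if_neg c]
  by_cases c : (100000:Int) ≤ mc; · rw [if_pos c, if_pos c]; norm_num [List.getD]
  rw [if_neg c, if_neg c]
  by_cases c : (50000:Int) ≤ mc; · rw [if_pos c, if_pos c]; norm_num [List.getD]
  rw [if_neg c, if_neg c]
  by_cases c : (25000:Int) ≤ mc; · rw [if_pos c, if_pos c]; norm_num [List.getD]
  rw [if_neg c, if_neg c]
  by_cases c : (10000:Int) ≤ mc; · rw [if_pos c, if_pos c]; norm_num [List.getD]
  rw [if_neg c, if_neg c]
  by_cases c : (5000:Int) ≤ mc; · rw [if_pos c, if_pos c]; norm_num [List.getD]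
  rw [if_neg c, if_neg c]
  by_cases c : (1000:Int) ≤ mc; · rw [if_pos c, if_pos c]; norm_num [List.getD]
  rw [if_neg c, if_neg c]; norm_num

-- ===== VERDICT (by name: the statement is the Claim_ definition above) =====
theorem calculate_optimal_chunk_size_spec : Claim_equal_calculate_optimal_chunk_size := by
  intro tr rsb mm _ _
  unfold Spec_calculate_optimal_chunk_size calculate_optimal_chunk_size calculate_optimal_chunk_size_alt
  exact (A_eval (PySem.Int.floordiv (mm * 1024 * 1024) rsb) tr).trans
        (B_eval (PySem.Int.floordiv (mm * 1024 * 1024) rsb) tr).symm
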